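-- pv_equiv track=rewrite | github.com/Grae-Drake/Python_Euler | poker_functions.py | straight_check
-- ===== SOURCE A (Python) =====
-- def convert(hand):
--     # Converts a string like '23TAK' to [2, 3, 10, 14, 13].
--     values = {x:i for i,x in enumerate("0123456789TJQKA")}
--     answer = []
--     hand = str(hand)
--     for x in hand:
--         answer.append(values[x])
--     return answer
--
-- def straight_check(hand):
--     # Returns [True,[high_card]] if all cards in hand are consecutive values,
--     # otherwise returns [False, []].
--     if type(hand) == str:
--         hand = convert(hand)
--     for x in hand:
--         hand = sorted(hand)
--     straight = True
--     for index, card in enumerate(hand[:-1]):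
--         if hand[index+1] != card+1:
--             straight = False
--     if straight == True:
--         return [straight, high_card_check(hand)]
--     else:
--         return [straight, []]
--
-- def high_card_check(hand):
--     # Returns an ordered list of the cards in hand from high to low.
--     # Output format is: [14, 10, 10, 4, 5]
--     if type(hand) == str:
--         hand = convert(hand)
--     return sorted(hand, reverse=True)
-- ===== SOURCE B (Python) =====
-- def convert(hand):
--     # Converts a string like '23TAK' to [2, 3, 10, 14, 13].
--     values = {x: i for i, x in enumerate("0123456789TJQKA")}
--     return [values[x] for x in str(hand)]
--
--
-- def high_card_check(hand):
--     # Returns an ordered list of the cards in hand from high to low.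
--     if type(hand) == str:
--         hand = convert(hand)
--     return sorted(hand, reverse=True)
--
--
-- def straight_check(hand):
--     # Returns [True, [high..low]] if the cards are consecutive, else [False, []].
--     # Decides straightness WITHOUT sorting: the hand is a straight iff its
--     # values are pairwise distinct and its max-min span equals len-1.
--     if type(hand) == str:
--         hand = convert(hand)
--     straight = len(set(hand)) == len(hand) and \
--         (not hand or max(hand) - min(hand) == len(hand) - 1)
--     return [straight, high_card_check(hand)] if straight else [straight, []]
-- ===== Notes on version B (the rewrite author's own statement) =====
-- stated objective: faster
-- what changed: Decides straightness without sorting: a hand is a straight iff its values are pairwise distinct (set cardinality) and max-min equals len-1, replacing A's n repeated sorts and adjacent-difference scan; sorting is only used to produce the high-card list.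
import Mathlib
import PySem

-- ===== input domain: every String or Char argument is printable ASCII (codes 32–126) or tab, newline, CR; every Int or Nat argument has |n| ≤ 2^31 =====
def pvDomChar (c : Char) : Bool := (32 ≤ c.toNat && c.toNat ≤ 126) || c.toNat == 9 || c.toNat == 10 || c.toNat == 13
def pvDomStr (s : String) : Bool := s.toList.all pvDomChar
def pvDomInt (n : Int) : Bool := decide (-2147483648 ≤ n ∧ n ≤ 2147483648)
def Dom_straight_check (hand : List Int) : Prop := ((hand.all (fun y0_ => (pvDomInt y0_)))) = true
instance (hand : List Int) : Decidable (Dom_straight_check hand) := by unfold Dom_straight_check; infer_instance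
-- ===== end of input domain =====

-- B decides straightness without sorting (distinct values + max-min span = len-1) instead of A's repeated sorts and adjacent-difference scan (objective: alternative).

-- ===== PORT A =====
-- high_card_check(hand) for a list argument: sorted(hand, reverse=True)
def high_card_check (hand : List Int) : List Int :=
  PySem.List.sorted hand (fun x => x) true

def straight_check (hand : List Int) : Bool × List Int :=
  -- for x in hand: hand = sorted(hand)
  let hand := hand.foldl (fun h _ => PySem.List.sorted h (fun x => x) false) hand
  -- straight = True; for index, card in enumerate(hand[:-1]): if hand[index+1] != card+1: straight = False
  let straight := (PySem.List.enumerate (PySem.List.slice hand none (some (-1))) 0).foldl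
      (fun st p => if PySem.List.pyGetD hand (p.1 + 1) 0 ≠ p.2 + 1 then false else st) true
  if straight then (straight, high_card_check hand) else (straight, [])

-- ===== PORT B =====
def straight_check_alt (hand : List Int) : Bool × List Int :=
  -- straight = len(set(hand)) == len(hand) and (not hand or max(hand) - min(hand) == len(hand) - 1)
  let straight :=
    decide (PySem.Set.len (PySem.Set.ofList hand) = (hand.length : Int)) &&
      (hand.isEmpty ||
        (match PySem.List.max? hand (fun x => x), PySem.List.min? hand (fun x => x) with
         | some M, some m => decide (M - m = (hand.length : Int) - 1)
         | _, _ => false))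
  if straight then (straight, high_card_check hand) else (straight, [])

-- ===== PRECONDITION & SPEC =====
def Spec_straight_check (hand : List Int) (out : Bool × List Int) : Prop := out = straight_check_alt hand
instance (hand : List Int) (out : Bool × List Int) : Decidable (Spec_straight_check hand out) := by unfold Spec_straight_check; infer_instance

-- ===== CLAIM (what is proved, stated in full; the proofs are below) =====
def Claim_equal_straight_check : Prop := ∀ (hand : List Int), Dom_straight_check hand → Spec_straight_check hand (straight_check hand)

-- ===== LEMMAS AND PROOFS =====

-- A's repeated-sort loop is sorting once.
theorem foldl_sort_const {α : Type} (l : List α) (init : List Int) :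
    l.foldl (fun h _ => PySem.List.sorted h (fun x => x) false) (PySem.List.sorted init (fun x => x) false)
      = PySem.List.sorted init (fun x => x) false := by
  induction l generalizing init with
  | nil => rfl
  | cons x xs ih =>
      simp only [List.foldl_cons, PySem.List.sorted_sorted]
      exact ih init

theorem repeated_sort (hand : List Int) :
    hand.foldl (fun h _ => PySem.List.sorted h (fun x => x) false) hand
      = PySem.List.sorted hand (fun x => x) false := by
  cases h : hand with
  | nil => rfl
  | cons x xs =>
      have : (x :: xs).foldl (fun h _ => PySem.List.sorted h (fun x => x) false) (x :: xs)
          = xs.foldl (fun h _ => PySem.List.sorted h (fun x => x) false)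
              (PySem.List.sorted (x :: xs) (fun x => x) false) := rfl
      rw [this, foldl_sort_const]

-- a fold that only ever flips the accumulator to false is an `all`
theorem foldl_sticky_absorb {α : Type} (Q : α → Prop) [DecidablePred Q] (l : List α) :
    l.foldl (fun st p => if Q p then false else st) false = false := by
  induction l with
  | nil => rfl
  | cons x xs ih =>
      simp only [List.foldl_cons]
      split <;> exact ih

theorem foldl_sticky_false {α : Type} (Q : α → Prop) [DecidablePred Q] (l : List α) (b : Bool) :
    l.foldl (fun st p => if Q p then false else st) b = (b && l.all (fun p => decide ¬ Q p)) := by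
  induction l generalizing b with
  | nil => simp
  | cons x xs ih =>
      simp only [List.foldl_cons, List.all_cons]
      by_cases h : Q x
      · rw [if_pos h, foldl_sticky_absorb]
        simp [h]
      · rw [if_neg h, ih b]
        simp [h]

-- the adjacent-difference scan over a sorted list is the chain condition
theorem scan_eq_chain (s : List Int) :
    ((PySem.List.enumerate (PySem.List.slice s none (some (-1))) 0).foldl
      (fun st p => if PySem.List.pyGetD s (p.1 + 1) 0 ≠ p.2 + 1 then false else st) true)
      = decide (List.IsChain (fun a b => b = a + 1) s) := by
  rw [PySem.List.slice_to_neg_one, foldl_sticky_false]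
  simp only [Bool.true_and]
  have hidx : ∀ (k : Nat) (hk : k + 1 < s.length),
      PySem.List.pyGetD s ((k : Int) + 1) 0 = s[k+1] := by
    intro k hk
    have h1 : ((k : Int) + 1) = ((k + 1 : Nat) : Int) := by push_cast; ring
    rw [h1, PySem.List.pyGetD_natCast]
    simp [List.getD, hk]
  by_cases hch : List.IsChain (fun a b => b = a + 1) s
  · have hc : ∀ i (h : i + 1 < s.length), s[i+1] = s[i] + 1 := by
      rw [List.isChain_iff_getElem] at hch; exact hch
    simp only [hch, decide_true]
    rw [List.all_eq_true]
    rintro ⟨i, v⟩ hp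
    rw [PySem.List.mem_enumerate_iff] at hp
    obtain ⟨k, hk, hpe⟩ := hp
    have hk' : k + 1 < s.length := by
      simp only [List.length_dropLast] at hk; omega
    simp only [Prod.mk.injEq] at hpe
    obtain ⟨rfl, rfl⟩ := hpe
    simp [hidx k hk', hc k hk']
  · have hc : ¬ ∀ i (h : i + 1 < s.length), s[i+1] = s[i] + 1 := by
      rw [List.isChain_iff_getElem] at hch; exact hch
    simp only [hch, decide_false]
    push Not at hc
    obtain ⟨i, hi, hne⟩ := hc
    rw [Bool.eq_false_iff]
    intro hall
    rw [List.all_eq_true] at hall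
    have hilt : i < s.dropLast.length := by
      simp only [List.length_dropLast]; omega
    have hmem : ((0 : Int) + (i : Int), s.dropLast[i]) ∈ PySem.List.enumerate s.dropLast 0 := by
      rw [PySem.List.mem_enumerate_iff]
      exact ⟨i, hilt, by simp⟩
    have hv := hall _ hmem
    simp only [not_not, ne_eq] at hv
    rw [(by ring : (0 : Int) + (i : Int) + 1 = (i : Int) + 1), hidx i hi,
      List.getElem_dropLast] at hv
    exact hne (of_decide_eq_true hv)

-- the last element of a :: t
def lastOf (a : Int) : List Int → Int
  | [] => a
  | b :: t => lastOf b t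

theorem lastOf_mem (a : Int) (t : List Int) : lastOf a t ∈ a :: t := by
  induction t generalizing a with
  | nil => simp [lastOf]
  | cons b u ih =>
      simp only [lastOf]
      exact List.mem_cons_of_mem a (ih b)

theorem le_lastOf (a : Int) (t : List Int) (h : (a :: t).Pairwise (· ≤ ·)) :
    ∀ y ∈ a :: t, y ≤ lastOf a t := by
  induction t generalizing a with
  | nil => simp [lastOf]
  | cons b u ih =>
      intro y hy
      have hab : a ≤ b := (List.pairwise_cons.mp h).1 b (by simp)
      have h' := (List.pairwise_cons.mp h).2
      rcases List.mem_cons.mp hy with rfl | hy'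
      · exact le_trans hab (ih b h' b (by simp))
      · exact ih b h' y hy'

theorem pairwise_lt_of (l : List Int) (hle : l.Pairwise (· ≤ ·)) (hnd : l.Nodup) :
    l.Pairwise (· < ·) := by
  refine (List.pairwise_and_iff.mpr ⟨hle, hnd⟩).imp ?_
  intro x y hxy
  exact lt_of_le_of_ne hxy.1 hxy.2

theorem span_ge (a : Int) (t : List Int) (h : (a :: t).Pairwise (· < ·)) :
    (t.length : Int) ≤ lastOf a t - a := by
  induction t generalizing a with
  | nil => simp [lastOf]
  | cons b u ih =>
      have hab : a < b := (List.pairwise_cons.mp h).1 b (by simp)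
      have h' := (List.pairwise_cons.mp h).2
      have := ih b h'
      simp only [lastOf, List.length_cons]
      push_cast
      omega

-- straightness of a sorted list in closed form: distinct and span = length - 1
theorem chain_iff_span (a : Int) (t : List Int) (h : (a :: t).Pairwise (· ≤ ·)) :
    List.IsChain (fun x y => y = x + 1) (a :: t)
      ↔ ((a :: t).Nodup ∧ lastOf a t - a = (t.length : Int)) := by
  induction t generalizing a with
  | nil => simp [lastOf]
  | cons b u ih =>
      have hab : a ≤ b := (List.pairwise_cons.mp h).1 b (by simp)
      have h' := (List.pairwise_cons.mp h).2
      have hbu : ∀ y ∈ u, b ≤ y := (List.pairwise_cons.mp h').1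
      rw [List.isChain_cons_cons, ih b h']
      simp only [lastOf, List.length_cons]
      constructor
      · rintro ⟨hba, hnd, hspan⟩
        refine ⟨List.nodup_cons.mpr ⟨?_, hnd⟩, by push_cast; omega⟩
        intro hmem
        rcases List.mem_cons.mp hmem with he | hmu
        · omega
        · have := hbu a hmu; omega
      · rintro ⟨hnd, hspan⟩
        have hnd' := (List.nodup_cons.mp hnd).2
        have hanot := (List.nodup_cons.mp hnd).1
        have hanb : a ≠ b := fun he => hanot (he ▸ List.mem_cons_self)
        have hbspan := span_ge b u (pairwise_lt_of _ h' hnd')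
        push_cast at hspan hbspan ⊢
        refine ⟨by omega, hnd', by omega⟩

-- len(set(xs)) == len(xs) is distinctness
theorem setlen_iff_nodup (xs : List Int) :
    PySem.Set.len (PySem.Set.ofList xs) = (xs.length : Int) ↔ xs.Nodup := by
  have hlen_def : PySem.Set.len (PySem.Set.ofList xs) = ((PySem.Set.ofList xs).length : Int) := by
    simp [PySem.Set.len]
  have hperm : (PySem.Set.ofList xs).Perm xs.dedup :=
    (List.perm_ext_iff_of_nodup (PySem.Set.nodup_ofList xs) xs.nodup_dedup).mpr
      (fun a => by simp [PySem.Set.mem_ofList, List.mem_dedup])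
  rw [hlen_def, hperm.length_eq]
  constructor
  · intro hl
    have hl' : xs.dedup.length = xs.length := by exact_mod_cast hl
    have he := List.Sublist.eq_of_length (List.dedup_sublist xs) hl'
    rw [← he]
    exact xs.nodup_dedup
  · intro h
    rw [List.Nodup.dedup h]

-- max(xs) is the last element of sorted(xs), min(xs) its head
theorem max_eq_lastOf (xs : List Int) (c : Int) (u : List Int) (M : Int)
    (hs : PySem.List.sorted xs (fun x => x) false = c :: u)
    (hM : PySem.List.max? xs (fun x => x) = some M) : M = lastOf c u := by
  have hpw : (c :: u).Pairwise (· ≤ ·) := by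
    have := PySem.List.sorted_pairwise xs (fun x : Int => x) ; rw [hs] at this; exact this
  have hlm : lastOf c u ∈ xs := by
    have := lastOf_mem c u
    rw [← hs, PySem.List.mem_sorted] at this
    exact this
  have hMm : M ∈ xs := PySem.List.max?_mem hM
  have hMs : M ∈ c :: u := by rw [← hs, PySem.List.mem_sorted]; exact hMm
  exact le_antisymm (le_lastOf c u hpw M hMs) (PySem.List.max?_isMax hM _ hlm)

theorem min_eq_head (xs : List Int) (c : Int) (u : List Int) (m : Int)
    (hs : PySem.List.sorted xs (fun x => x) false = c :: u)
    (hm : PySem.List.min? xs (fun x => x) = some m) : m = c := by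
  have hpw : (c :: u).Pairwise (· ≤ ·) := by
    have := PySem.List.sorted_pairwise xs (fun x : Int => x) ; rw [hs] at this; exact this
  have hcm : c ∈ xs := by
    have : c ∈ c :: u := by simp
    rw [← hs, PySem.List.mem_sorted] at this; exact this
  have hmm : m ∈ xs := PySem.List.min?_mem hm
  have hms : m ∈ c :: u := by rw [← hs, PySem.List.mem_sorted]; exact hmm
  have hle : ∀ y ∈ c :: u, c ≤ y := by
    intro y hy
    rcases List.mem_cons.mp hy with rfl | hy'
    · exact le_refl _
    · exact (List.pairwise_cons.mp hpw).1 y hy'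
  exact le_antisymm (PySem.List.min?_isMin hm _ hcm) (hle m hms)

-- reverse-sorting the sorted list is reverse-sorting the original
theorem sorted_rev_of_sorted (hand : List Int) :
    PySem.List.sorted (PySem.List.sorted hand (fun x => x) false) (fun x => x) true
      = PySem.List.sorted hand (fun x => x) true := by
  apply PySem.List.eq_of_perm_of_pairwise_le_of_injective (fun x : Int => -x)
    (fun a b h => by simpa using h)
  · exact ((PySem.List.sorted_perm _ _ _).trans (PySem.List.sorted_perm hand _ _)).trans
      (PySem.List.sorted_perm hand _ _).symm
  · exact (PySem.List.sorted_pairwise_rev _ _).imp (by intro a b h; simpa using h)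
  · exact (PySem.List.sorted_pairwise_rev _ _).imp (by intro a b h; simpa using h)

-- the two straightness flags agree
theorem flags_eq (hand : List Int) :
    decide (List.IsChain (fun a b => b = a + 1) (PySem.List.sorted hand (fun x => x) false))
      = (decide (PySem.Set.len (PySem.Set.ofList hand) = (hand.length : Int)) &&
          (hand.isEmpty ||
            (match PySem.List.max? hand (fun x => x), PySem.List.min? hand (fun x => x) with
             | some M, some m => decide (M - m = (hand.length : Int) - 1)
             | _, _ => false))) := by
  cases hh : hand with
  | nil => decide
  | cons x xs =>
      rw [← hh]
      have hne : hand ≠ [] := by rw [hh]; simp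
      obtain ⟨c, u, hs⟩ : ∃ c u, PySem.List.sorted hand (fun x => x) false = c :: u := by
        cases hsv : PySem.List.sorted hand (fun x => x) false with
        | nil => rw [PySem.List.sorted_eq_nil_iff] at hsv; exact absurd hsv hne
        | cons c u => exact ⟨c, u, rfl⟩
      obtain ⟨M, hM⟩ : ∃ M, PySem.List.max? hand (fun x => x) = some M := by
        cases hMv : PySem.List.max? hand (fun x => x) with
        | none => rw [PySem.List.max?_eq_none_iff] at hMv; exact absurd hMv hne
        | some M => exact ⟨M, rfl⟩
      obtain ⟨m, hm⟩ : ∃ m, PySem.List.min? hand (fun x => x) = some m := by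
        cases hmv : PySem.List.min? hand (fun x => x) with
        | none => rw [PySem.List.min?_eq_none_iff] at hmv; exact absurd hmv hne
        | some m => exact ⟨m, rfl⟩
      have hpw : (c :: u).Pairwise (· ≤ ·) := by
        have := PySem.List.sorted_pairwise hand (fun x : Int => x); rw [hs] at this; exact this
      have hlen : hand.length = u.length + 1 := by
        have := PySem.List.length_sorted hand (fun x : Int => x) false
        rw [hs] at this; simpa using this.symm
      have hMl := max_eq_lastOf hand c u M hs hM
      have hml := min_eq_head hand c u m hs hm
      have hemp : hand.isEmpty = false := by rw [hh]; rfl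
      rw [hs, hM, hm, hemp]
      simp only [Bool.false_or]
      have h1 : (PySem.Set.len (PySem.Set.ofList hand) = (hand.length : Int)) ↔ (c :: u).Nodup := by
        rw [setlen_iff_nodup, ← hs]
        exact ((PySem.List.sorted_perm hand (fun x : Int => x) false).nodup_iff).symm
      have h2 : (M - m = (hand.length : Int) - 1) ↔ (lastOf c u - c = (u.length : Int)) := by
        rw [hMl, hml, hlen]; push_cast; constructor <;> intro <;> omega
      have e1 : decide (List.IsChain (fun a b => b = a + 1) (c :: u))
          = decide ((c :: u).Nodup ∧ lastOf c u - c = (u.length : Int)) :=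
        decide_eq_decide.mpr (chain_iff_span c u hpw)
      have e2 : decide (PySem.Set.len (PySem.Set.ofList hand) = (hand.length : Int))
          = decide ((c :: u).Nodup) := decide_eq_decide.mpr h1
      have e3 : decide (M - m = (hand.length : Int) - 1)
          = decide (lastOf c u - c = (u.length : Int)) := decide_eq_decide.mpr h2
      rw [e1, e2, e3]
      simp

-- ===== VERDICT (by name: the statement is the Claim_ definition above) =====
theorem straight_check_spec : Claim_equal_straight_check := by
  intro hand _
  show straight_check hand = straight_check_alt hand
  simp only [straight_check, straight_check_alt, repeated_sort, scan_eq_chain, ← flags_eq]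
  by_cases hch : List.IsChain (fun a b => b = a + 1) (PySem.List.sorted hand (fun x => x) false)
  · simp [hch, high_card_check, sorted_rev_of_sorted]
  · simp [hch]
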